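-- pv_equiv track=rewrite | github.com/hoangop/my_project | find_order.py | count_hits
-- ===== SOURCE A (Python) =====
-- def gcd(m, n):
--     (m, n) = max(m, n), min(m, n)
--     assert m > 0
--     assert n >= 0
--     while n > 0:
--         (m, n) = (n, m % n)
--     return m
--
-- def modular_exponentiate(a, k, n):
--     m = a
--     res = 1
--     while k > 0:
--         if k % 2 == 1:
--             res = (res * m) % n
--         m = (m * m) % n
--         k //= 2
--     return res
--
-- def find_order(a, n):
--     if gcd(a, n) != 1:
--         return None
--     r = 1
--     power = a % n
--     while power != 1:
--         power = (power * a) % n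
--         r += 1
--     return r
--
-- def count_hits(n):
--     hits = 0
--     for a in range(2, n):
--         if gcd(a, n) != 1:
--             continue  # skip non-coprime
--         r = find_order(a, n)
--         if r % 2 != 0:
--             continue  # only interested in even order
--         val = modular_exponentiate(a, r // 2, n)
--         if (val + 1) % n != 0:
--             hits += 1
--     return hits
-- ===== SOURCE B (Python) =====
-- def _coprime(a, b):
--     while b:
--         a, b = b, a % b
--     return a == 1
--
-- def count_hits(n):
--     hits = 0
--     for a in range(2, n):
--         if not _coprime(a, n):
--             continue
--         # record the whole power trajectory a^1, a^2, ... (mod n) up to,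
--         # but not including, the first 1; its length + 1 is the order.
--         powers = []
--         p = a % n
--         while p != 1:
--             powers.append(p)
--             p = (p * a) % n
--         r = len(powers) + 1
--         if r % 2 == 0 and powers[r // 2 - 1] != n - 1:
--             hits += 1
--     return hits
-- ===== Notes on version B (the rewrite author's own statement) =====
-- stated objective: alternative
-- what changed: B records each element's power trajectory once and reads the half-order power straight out of that list, replacing A's separate order loop, redundant second gcd pass inside find_order and the binary modular-exponentiation routine; coprimality is one plain Euclid recursion without A's max/min swap.
import Mathlib
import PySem

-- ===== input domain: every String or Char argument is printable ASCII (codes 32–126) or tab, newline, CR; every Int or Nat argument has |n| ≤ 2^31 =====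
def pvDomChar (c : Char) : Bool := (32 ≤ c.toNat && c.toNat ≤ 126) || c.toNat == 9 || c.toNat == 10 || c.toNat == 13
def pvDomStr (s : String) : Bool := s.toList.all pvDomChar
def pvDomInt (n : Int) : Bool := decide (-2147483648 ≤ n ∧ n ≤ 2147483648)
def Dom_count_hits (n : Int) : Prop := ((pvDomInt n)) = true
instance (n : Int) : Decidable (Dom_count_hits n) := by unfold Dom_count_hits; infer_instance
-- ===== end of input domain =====

-- B replaces A's find_order + binary modexp by one stored power trajectory per element
-- (alternative decomposition, same return value; proof below).

-- ===== PORT A =====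
-- Euclid loop of A's gcd: while n > 0: (m, n) = (n, m % n)
def pvEuclidA (m n : Int) : Int :=
  if h : 0 < n then pvEuclidA n (PySem.Int.mod m n) else m
termination_by n.toNat
decreasing_by
  have h1 := PySem.Int.mod_nonneg m h
  have h2 := PySem.Int.mod_lt m h
  omega

def pvGcdA (m n : Int) : Int := pvEuclidA (max m n) (min m n)

-- while k > 0: if k % 2 == 1: res = (res*m) % n; m = (m*m) % n; k //= 2
def pvMeAux (n m res k : Int) : Int :=
  if h : 0 < k then
    pvMeAux n (PySem.Int.mod (m * m) n)
      (if PySem.Int.mod k 2 = 1 then PySem.Int.mod (res * m) n else res)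
      (PySem.Int.floordiv k 2)
  else res
termination_by k.toNat
decreasing_by
  have : PySem.Int.floordiv k 2 = k / 2 := PySem.Int.floordiv_eq_ediv_of_pos (by omega : (0:Int) < 2)
  omega

def modular_exponentiate (a k n : Int) : Int := pvMeAux n a 1 k

-- find_order's while loop, fuel-guarded (the fuel n.toNat+1 exceeds the order of any
-- coprime element, so the guard is never the exit on inputs count_hits reaches)
def pvFoAux (a n : Int) : Nat → Int → Int → Int
  | 0, _, r => r
  | fuel + 1, power, r =>
      if power = 1 then r else pvFoAux a n fuel (PySem.Int.mod (power * a) n) (r + 1)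

def find_order (a n : Int) : Option Int :=
  if pvGcdA a n ≠ 1 then none
  else some (pvFoAux a n (n.toNat + 1) (PySem.Int.mod a n) 1)

def count_hits (n : Int) : Int :=
  (PySem.List.pyRange 2 n 1).foldl (fun hits a =>
    if pvGcdA a n ≠ 1 then hits
    else
      match find_order a n with
      | none => hits  -- unreachable: gcd(a,n) = 1 was just checked (Python would raise on None)
      | some r =>
        if PySem.Int.mod r 2 ≠ 0 then hits
        else
          let val := modular_exponentiate a (PySem.Int.floordiv r 2) n
          if PySem.Int.mod (val + 1) n ≠ 0 then hits + 1 else hits) 0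

-- ===== PORT B =====
-- while b: a, b = b, a % b; return a == 1
def pvCoprimeB (a b : Int) : Bool :=
  if h : b ≠ 0 then pvCoprimeB b (PySem.Int.mod a b) else a == 1
termination_by b.natAbs
decreasing_by
  rcases lt_or_gt_of_ne h with hb | hb
  · have h1 := (PySem.Int.mod_neg_bounds a hb).1
    have h2 := (PySem.Int.mod_neg_bounds a hb).2
    omega
  · have h1 := PySem.Int.mod_nonneg a hb
    have h2 := PySem.Int.mod_lt a hb
    omega

-- while p != 1: powers.append(p); p = (p*a) % n   (same fuel guard as port A's order loop)
def pvTrajB (a n : Int) : Nat → Int → List Int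
  | 0, _ => []
  | fuel + 1, p =>
      if p = 1 then [] else p :: pvTrajB a n fuel (PySem.Int.mod (p * a) n)

def count_hits_alt (n : Int) : Int :=
  (PySem.List.pyRange 2 n 1).foldl (fun hits a =>
    if pvCoprimeB a n then
      let powers := pvTrajB a n (n.toNat + 1) (PySem.Int.mod a n)
      let r : Int := (powers.length : Int) + 1
      if PySem.Int.mod r 2 = 0 ∧
          PySem.List.pyGetD powers (PySem.Int.floordiv r 2 - 1) 0 ≠ n - 1 then
        hits + 1
      else hits
    else hits) 0

-- ===== PRECONDITION & SPEC =====
def Spec_count_hits (n : Int) (out : Int) : Prop := out = count_hits_alt n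
instance (n : Int) (out : Int) : Decidable (Spec_count_hits n out) := by unfold Spec_count_hits; infer_instance

-- ===== CLAIM (what is proved, stated in full; the proofs are below) =====
def Claim_equal_count_hits : Prop := ∀ (n : Int), Dom_count_hits n → Spec_count_hits n (count_hits n)

-- ===== LEMMAS AND PROOFS =====

-- B's Euclid recursion decides whether A's Euclid loop returns 1
theorem pv_copr_eq (fuel : Nat) : ∀ (a b : Int), 0 ≤ b → b.toNat ≤ fuel →
    pvCoprimeB a b = decide (pvEuclidA a b = 1) := by
  induction fuel with
  | zero =>
    intro a b hb hle
    have hb0 : b = 0 := by omega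
    subst hb0
    rw [pvCoprimeB.eq_def, pvEuclidA.eq_def]
    by_cases h1 : a = 1 <;> simp [h1]
  | succ f ih =>
    intro a b hb hle
    rw [pvCoprimeB.eq_def, pvEuclidA.eq_def]
    by_cases hb0 : b = 0
    · subst hb0; by_cases h1 : a = 1 <;> simp [h1]
    · have hbpos : 0 < b := by omega
      have h1 := PySem.Int.mod_nonneg a hbpos
      have h2 := PySem.Int.mod_lt a hbpos
      rw [dif_pos hb0, dif_pos hbpos]
      exact ih b (PySem.Int.mod a b) h1 (by omega)

-- A's order loop returns 1 + length of B's trajectory (any fuel, any start)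
theorem pv_fo_traj (a n : Int) (fuel : Nat) : ∀ (p r : Int),
    pvFoAux a n fuel p r = r + ((pvTrajB a n fuel p).length : Int) := by
  induction fuel with
  | zero => intro p r; simp [pvFoAux, pvTrajB]
  | succ f ih =>
    intro p r
    by_cases hp : p = 1
    · simp [pvFoAux, pvTrajB, hp]
    · simp only [pvFoAux, pvTrajB, if_neg hp, List.length_cons]
      rw [ih]
      push_cast
      ring

-- modular-arithmetic helpers used by the loop invariants
theorem pv_mul_emod_left (n x y : Int) : (x % n * y) % n = (x * y) % n :=
  Int.ModEq.mul_right y (Int.emod_emod_of_dvd x dvd_rfl)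

theorem pv_pow_emod_mul (n x y : Int) (j : Nat) : (x * (y % n) ^ j) % n = (x * y ^ j) % n :=
  Int.ModEq.mul_left x (Int.ModEq.pow j (Int.emod_emod_of_dvd y dvd_rfl))

-- elements of the trajectory are the successive powers
theorem pv_traj_get (a n : Int) (hn : 0 < n) (fuel : Nat) : ∀ (p : Int), 0 ≤ p → p < n →
    ∀ (i : Nat) (h : i < (pvTrajB a n fuel p).length),
      (pvTrajB a n fuel p)[i] = (p * a ^ i) % n := by
  induction fuel with
  | zero => intro p _ _ i h; simp [pvTrajB] at h
  | succ f ih =>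
    intro p hp0 hpn i h
    by_cases hp1 : p = 1
    · simp [pvTrajB, hp1] at h
    · cases i with
      | zero =>
        simp only [pvTrajB, if_neg hp1, List.getElem_cons_zero, pow_zero, mul_one]
        exact (Int.emod_eq_of_lt hp0 hpn).symm
      | succ i =>
        simp only [pvTrajB, if_neg hp1, List.length_cons, add_lt_add_iff_right] at h
        simp only [pvTrajB, if_neg hp1, List.getElem_cons_succ]
        rw [ih (PySem.Int.mod (p * a) n) (PySem.Int.mod_nonneg _ hn) (PySem.Int.mod_lt _ hn) i h]
        rw [PySem.Int.mod_eq_emod_of_pos hn, pv_mul_emod_left]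
        congr 1
        ring

-- binary modular exponentiation computes the power (positive exponent)
theorem pv_me_eq (n : Int) (hn : 0 < n) (fuel : Nat) : ∀ (k : Int), 0 < k → k.toNat ≤ fuel →
    ∀ (m res : Int), pvMeAux n m res k = (res * m ^ k.toNat) % n := by
  induction fuel with
  | zero => intro k hk hle; exact absurd hk (by omega)
  | succ f ih =>
    intro k hk hle m res
    rw [pvMeAux.eq_def, dif_pos hk]
    have hfd : PySem.Int.floordiv k 2 = k / 2 :=
      PySem.Int.floordiv_eq_ediv_of_pos (by omega : (0:Int) < 2)
    have hmd : PySem.Int.mod k 2 = k % 2 := PySem.Int.mod_eq_emod_of_pos (by omega)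
    rw [hfd, hmd]
    by_cases h1 : k = 1
    · subst h1
      norm_num
      rw [pvMeAux.eq_def, dif_neg (by omega : ¬ (0:Int) < 0)]
      rw [PySem.Int.mod_eq_emod_of_pos hn]
    · have hk2 : 0 < k / 2 := by omega
      rw [ih (k / 2) hk2 (by omega)]
      have hj : k.toNat = 2 * (k / 2).toNat + (k % 2).toNat := by omega
      have hmm : PySem.Int.mod (m * m) n = (m * m) % n :=
        PySem.Int.mod_eq_emod_of_pos hn
      by_cases hpar : k % 2 = 1
      · rw [if_pos hpar, hmm, PySem.Int.mod_eq_emod_of_pos hn]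
        rw [pv_pow_emod_mul, pv_mul_emod_left]
        congr 1
        have h1' : (k % 2).toNat = 1 := by omega
        rw [hj, h1']
        ring
      · rw [if_neg hpar, hmm]
        rw [pv_pow_emod_mul]
        congr 1
        have h0 : (k % 2).toNat = 0 := by omega
        rw [hj, h0]
        ring

-- ===== VERDICT (by name: the statement is the Claim_ definition above) =====
theorem count_hits_spec : Claim_equal_count_hits := by
  intro n _
  unfold Spec_count_hits count_hits count_hits_alt
  apply PySem.List.foldl_congr_mem
  intro hits a ha
  rw [PySem.List.mem_pyRange_one] at ha
  obtain ⟨ha2, han⟩ := ha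
  have hn : 0 < n := by omega
  have hga : pvGcdA a n = pvEuclidA n a := by
    unfold pvGcdA
    rw [max_eq_right (le_of_lt han), min_eq_left (le_of_lt han)]
  have hmodan : PySem.Int.mod a n = a := by
    rw [PySem.Int.mod_eq_emod_of_pos hn]
    exact Int.emod_eq_of_lt (by omega) han
  have hcop : pvCoprimeB a n = decide (pvGcdA a n = 1) := by
    rw [pvCoprimeB.eq_def, dif_pos (by omega : n ≠ 0), hmodan, hga]
    exact pv_copr_eq a.toNat n a (by omega) (le_refl _)
  by_cases hg : pvGcdA a n = 1
  · -- coprime: compare the two per-element bodies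
    have hfo : find_order a n =
        some (1 + ((pvTrajB a n (n.toNat + 1) a).length : Int)) := by
      unfold find_order
      rw [if_neg (by simpa using hg), hmodan, pv_fo_traj]
    simp only [hcop, hg, decide_true, if_true, hmodan, hfo, ne_eq, not_true_eq_false,
      if_false, if_true]
    have htwo : (0:Int) < 2 := by omega
    rw [PySem.Int.mod_eq_emod_of_pos htwo, PySem.Int.mod_eq_emod_of_pos htwo,
      PySem.Int.floordiv_eq_ediv_of_pos htwo, PySem.Int.floordiv_eq_ediv_of_pos htwo,
      show (((pvTrajB a n (n.toNat + 1) a).length : Int) + 1 : Int) = 1 + ((pvTrajB a n (n.toNat + 1) a).length : Int) from by ring]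
    by_cases hpar : (1 + ((pvTrajB a n (n.toNat + 1) a).length : Int)) % 2 = 0
    · have hL1 : 1 ≤ ((pvTrajB a n (n.toNat + 1) a).length : Int) := by omega
      have hk1 : (0:Int) < ((1 + ((pvTrajB a n (n.toNat + 1) a).length : Int)) / 2) := by omega
      have hval : modular_exponentiate a ((1 + ((pvTrajB a n (n.toNat + 1) a).length : Int)) / 2) n = a ^ ((1 + ((pvTrajB a n (n.toNat + 1) a).length : Int)) / 2).toNat % n := by
        unfold modular_exponentiate
        rw [pv_me_eq n hn ((1 + ((pvTrajB a n (n.toNat + 1) a).length : Int)) / 2).toNat ((1 + ((pvTrajB a n (n.toNat + 1) a).length : Int)) / 2) hk1 (le_refl _) a 1, one_mul]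
      have helem : PySem.List.pyGetD (pvTrajB a n (n.toNat + 1) a) (((1 + ((pvTrajB a n (n.toNat + 1) a).length : Int)) / 2) - 1) 0 = a ^ ((1 + ((pvTrajB a n (n.toNat + 1) a).length : Int)) / 2).toNat % n := by
        rw [PySem.List.pyGetD_eq_getElem (pvTrajB a n (n.toNat + 1) a) 0 (by omega) (by omega)]
        rw [pv_traj_get a n hn (n.toNat + 1) a (by omega) han (((1 + ((pvTrajB a n (n.toNat + 1) a).length : Int)) / 2) - 1).toNat (by omega)]
        rw [show a * a ^ (((1 + ((pvTrajB a n (n.toNat + 1) a).length : Int)) / 2) - 1).toNat = a ^ ((((1 + ((pvTrajB a n (n.toNat + 1) a).length : Int)) / 2) - 1).toNat + 1) from (pow_succ' a _).symm]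
        congr 2
        omega
      rw [hval, helem]
      have hvb0 : 0 ≤ a ^ ((1 + ((pvTrajB a n (n.toNat + 1) a).length : Int)) / 2).toNat % n := Int.emod_nonneg _ (by omega)
      have hvbl : a ^ ((1 + ((pvTrajB a n (n.toNat + 1) a).length : Int)) / 2).toNat % n < n := Int.emod_lt_of_pos _ hn
      have hiff : ((a ^ ((1 + ((pvTrajB a n (n.toNat + 1) a).length : Int)) / 2).toNat % n + 1) % n = 0) ↔ (a ^ ((1 + ((pvTrajB a n (n.toNat + 1) a).length : Int)) / 2).toNat % n = n - 1) := by
        constructor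
        · intro h
          by_contra hne
          have h2 : (a ^ ((1 + ((pvTrajB a n (n.toNat + 1) a).length : Int)) / 2).toNat % n + 1) % n = a ^ ((1 + ((pvTrajB a n (n.toNat + 1) a).length : Int)) / 2).toNat % n + 1 :=
            Int.emod_eq_of_lt (by omega) (by omega)
          omega
        · intro h
          rw [h, show n - 1 + 1 = n from by ring, Int.emod_self]
      rw [PySem.Int.mod_eq_emod_of_pos hn]
      simp only [hpar, not_true_eq_false, if_false, true_and]
      by_cases hv : a ^ ((1 + ((pvTrajB a n (n.toNat + 1) a).length : Int)) / 2).toNat % n = n - 1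
      · rw [if_neg (by simpa using hiff.mpr hv), if_neg (by simpa using hv)]
      · have hnz : ¬ (a ^ ((1 + ((pvTrajB a n (n.toNat + 1) a).length : Int)) / 2).toNat % n + 1) % n = 0 := fun h => hv (hiff.mp h)
        rw [if_pos hnz, if_pos hv]
    · simp [hpar]
  · simp [hcop, hg]
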